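-- pv_equiv track=rewrite | github.com/sanupanji/python | function_exercises/function10.py | sum1_69
-- ===== SOURCE A (Python) =====
-- def sum1_69(lst):
--     sume = 0
--     index = -1
--     c = 0
--     for i in lst:
--         if lst.index(i, c) > index:
--             if i == 6:
--                 if lst[c:].count(9) > 0:
--                     index = lst.index(9, c)
--                 else:
--                     sume += i
--             else:
--                 sume += i
--         c += 1
--     return sume
-- ===== SOURCE B (Python) =====
-- def sum1_69(lst):
--     # has9[j] is True iff 9 occurs in lst[j:], computed by one right-to-left pass
--     has9 = []
--     seen = False
--     for x in reversed(lst):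
--         seen = seen or x == 9
--         has9.append(seen)
--     has9.reverse()
--     total = 0
--     skipping = False
--     for x, h in zip(lst, has9):
--         if skipping:
--             if x == 9:
--                 skipping = False
--         elif x == 6 and h:
--             skipping = True
--         else:
--             total += x
--     return total
-- ===== Notes on version B (the rewrite author's own statement) =====
-- stated objective: alternative
-- what changed: A consults the original list at every step (lst.index with a start offset, a slice copy and a count to find the 9 closing a skip section); B instead precomputes 'a 9 occurs at or after this position' in one right-to-left pass and then sums in a single left-to-right pass driven by a boolean skip flag.
import Mathlib
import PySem

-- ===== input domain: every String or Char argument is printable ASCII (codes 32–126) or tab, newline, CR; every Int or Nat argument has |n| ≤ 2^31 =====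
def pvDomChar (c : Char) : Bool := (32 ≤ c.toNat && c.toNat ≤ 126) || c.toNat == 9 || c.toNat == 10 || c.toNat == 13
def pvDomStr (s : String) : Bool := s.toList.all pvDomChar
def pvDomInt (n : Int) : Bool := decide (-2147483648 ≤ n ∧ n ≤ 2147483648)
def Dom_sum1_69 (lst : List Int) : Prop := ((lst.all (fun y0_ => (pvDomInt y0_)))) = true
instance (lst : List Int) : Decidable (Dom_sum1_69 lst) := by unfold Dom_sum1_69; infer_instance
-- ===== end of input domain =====

-- B: instead of A's index/count/slice rescans, one right-to-left pass marks whether a 9 lies ahead and one left-to-right pass sums with a skip flag.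

-- ===== PORT A =====
-- loop body of A's for-loop; state = (sume, index, c)
def sum1_69_step (lst : List Int) (s : Int × Int × Int) (i : Int) : Int × Int × Int :=
  -- lst.index(i, c) ported as index into the slice lst[c:] plus c; the .getD 0 is
  -- unreachable (lst[c] == i, resp. guarded by count(9) > 0), exactly where Python would raise
  let pos := ((PySem.List.index? (PySem.List.slice lst (some s.2.2) none) i).map
      (fun (j : Nat) => (j : Int) + s.2.2)).getD 0
  if pos > s.2.1 then
    if i = 6 then
      if PySem.List.count (PySem.List.slice lst (some s.2.2) none) 9 > 0 then
        (s.1, ((PySem.List.index? (PySem.List.slice lst (some s.2.2) none) 9).map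
            (fun (j : Nat) => (j : Int) + s.2.2)).getD 0, s.2.2 + 1)
      else (s.1 + i, s.2.1, s.2.2 + 1)
    else (s.1 + i, s.2.1, s.2.2 + 1)
  else (s.1, s.2.1, s.2.2 + 1)

def sum1_69 (lst : List Int) : Int :=
  (lst.foldl (sum1_69_step lst) (0, -1, 0)).1

-- ===== PORT B =====
-- right-to-left pass: first component lists, per position, whether a 9 occurs at or after it;
-- second component is that flag for the whole list
def suffixHas9 : List Int → List Bool × Bool
  | [] => ([], false)
  | x :: rest =>
    let p := suffixHas9 rest
    let seen := p.2 || (x == 9)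
    (seen :: p.1, seen)

-- loop body of B's second pass; state = (total, skipping)
def sum1_69_altStep (s : Int × Bool) (xh : Int × Bool) : Int × Bool :=
  if s.2 then (if xh.1 = 9 then (s.1, false) else s)
  else if xh.1 = 6 ∧ xh.2 = true then (s.1, true)
  else (s.1 + xh.1, s.2)

def sum1_69_alt (lst : List Int) : Int :=
  ((lst.zip (suffixHas9 lst).1).foldl sum1_69_altStep (0, false)).1

-- ===== PRECONDITION & SPEC =====
def Spec_sum1_69 (lst : List Int) (out : Int) : Prop := out = sum1_69_alt lst
instance (lst : List Int) (out : Int) : Decidable (Spec_sum1_69 lst out) := by unfold Spec_sum1_69; infer_instance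

-- ===== CLAIM (what is proved, stated in full; the proofs are below) =====
def Claim_equal_sum1_69 : Prop := ∀ (lst : List Int), Dom_sum1_69 lst → Spec_sum1_69 lst (sum1_69 lst)

-- ===== LEMMAS AND PROOFS =====

-- reference semantics: sum the list, but a 6 followed (later) by a 9 erases everything up to and
-- including that 9; a 6 with no later 9 is just added
def skip9 : List Int → List Int
  | [] => []
  | x :: r => if x = 9 then r else skip9 r

lemma skip9_length_le : ∀ l : List Int, (skip9 l).length ≤ l.length := by
  intro l
  induction l with
  | nil => simp [skip9]
  | cons x r ih =>
    by_cases hx : x = 9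
    · simp [skip9, hx]
    · simp [skip9, hx]; omega

def go : List Int → Int
  | [] => 0
  | x :: rest =>
    if x = 6 then
      if (9 : Int) ∈ rest then go (skip9 rest) else 6 + go rest
    else x + go rest
termination_by l => l.length
decreasing_by
  · have := skip9_length_le rest; simp; omega
  · simp
  · simp

lemma go_cons (x : Int) (rest : List Int) : go (x :: rest) =
    if x = 6 then (if (9 : Int) ∈ rest then go (skip9 rest) else 6 + go rest)
    else x + go rest := by
  rw [go]

lemma seen_eq : ∀ l : List Int, (suffixHas9 l).2 = decide ((9 : Int) ∈ l) := by
  intro l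
  induction l with
  | nil => simp [suffixHas9]
  | cons x r ih =>
    by_cases hx : x = 9
    · simp [suffixHas9, hx]
    · simp [suffixHas9, ih, hx, Ne.symm hx]

lemma A_both : ∀ t : List Int,
    (∀ (lst : List Int) (k : Nat) (a idx : Int), lst.drop k = t → idx < (k : Int) →
      (t.foldl (sum1_69_step lst) (a, idx, (k : Int))).1 = a + go t) ∧
    (∀ (lst : List Int) (k j : Nat) (a : Int), lst.drop k = t →
      PySem.List.index? t 9 = some j →
      (t.foldl (sum1_69_step lst) (a, (k : Int) + (j : Int), (k : Int))).1
        = a + go (skip9 t)) := by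
  intro t
  induction t with
  | nil => exact ⟨fun _ _ a _ _ _ => by simp [go], fun _ _ _ a _ _ => by simp [skip9, go]⟩
  | cons x t' ih =>
    have hdropsucc : ∀ (lst : List Int) (k : Nat), lst.drop k = x :: t' →
        lst.drop (k + 1) = t' := by
      intro lst k h
      have : lst.drop (k + 1) = (lst.drop k).drop 1 := by
        rw [List.drop_drop]
      rw [this, h]; rfl
    constructor
    · intro lst k a idx hdrop hidx
      have hslice : PySem.List.slice lst (some (k : Int)) none = x :: t' := by
        rw [PySem.List.slice_from_natCast, hdrop]
      simp only [List.foldl_cons]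
      have hstep : sum1_69_step lst (a, idx, (k : Int)) x =
          (if x = 6 then
            (if PySem.List.count (x :: t') 9 > 0 then
              ((a, ((PySem.List.index? (x :: t') 9).map (fun (j : Nat) => (j : Int) + (k : Int))).getD 0,
                (k : Int) + 1) : Int × Int × Int)
            else (a + x, idx, (k : Int) + 1))
          else (a + x, idx, (k : Int) + 1)) := by
        simp only [sum1_69_step, hslice, PySem.List.index?_cons_self, Option.map_some,
          Option.getD_some, Nat.cast_zero, zero_add]
        rw [if_pos hidx]
      rw [hstep]
      by_cases hx : x = 6
      · subst hx
        rw [if_pos rfl]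
        have hcount : (PySem.List.count ((6 : Int) :: t') 9 > 0) ↔ (9 : Int) ∈ t' := by
          rw [PySem.List.count_eq]
          have h6 : List.count (9 : Int) ((6 : Int) :: t') = List.count (9 : Int) t' := by
            simp
          rw [h6]
          exact List.count_pos_iff
        by_cases h9 : (9 : Int) ∈ t'
        · rw [if_pos (hcount.mpr h9)]
          obtain ⟨j', hj'⟩ := Option.isSome_iff_exists.mp
            ((PySem.List.index?_isSome_iff t' 9).mpr h9)
          have hidx9 : PySem.List.index? ((6 : Int) :: t') 9 = some (j' + 1) := by
            rw [PySem.List.index?_cons_of_ne t' (by decide), hj']; rfl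
          rw [hidx9]
          simp only [Option.map_some, Option.getD_some]
          have hco : ((j' + 1 : Nat) : Int) + (k : Int)
              = ((k + 1 : Nat) : Int) + (j' : Int) := by push_cast; ring
          have hco2 : (k : Int) + 1 = ((k + 1 : Nat) : Int) := by push_cast; ring
          rw [hco, hco2]
          rw [(ih.2) lst (k + 1) j' a (hdropsucc lst k hdrop) hj']
          rw [go_cons, if_pos rfl, if_pos h9]
        · rw [if_neg (fun h => h9 (hcount.mp h))]
          have hco2 : (k : Int) + 1 = ((k + 1 : Nat) : Int) := by push_cast; ring
          rw [hco2, (ih.1) lst (k + 1) (a + 6) idx (hdropsucc lst k hdrop)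
            (lt_trans hidx (by push_cast; omega))]
          rw [go_cons, if_pos rfl, if_neg h9]; ring
      · rw [if_neg hx]
        have hco2 : (k : Int) + 1 = ((k + 1 : Nat) : Int) := by push_cast; ring
        rw [hco2, (ih.1) lst (k + 1) (a + x) idx (hdropsucc lst k hdrop)
          (lt_trans hidx (by push_cast; omega))]
        rw [go_cons, if_neg hx]; ring
    · intro lst k j a hdrop hj
      have hslice : PySem.List.slice lst (some (k : Int)) none = x :: t' := by
        rw [PySem.List.slice_from_natCast, hdrop]
      simp only [List.foldl_cons]
      have hnotgt : ¬ ((k : Int) > (k : Int) + (j : Int)) := by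
        have : (0 : Int) ≤ (j : Int) := Int.natCast_nonneg j
        omega
      have hstep : sum1_69_step lst (a, (k : Int) + (j : Int), (k : Int)) x =
          (a, (k : Int) + (j : Int), (k : Int) + 1) := by
        simp only [sum1_69_step, hslice, PySem.List.index?_cons_self, Option.map_some,
          Option.getD_some, Nat.cast_zero, zero_add]
        rw [if_neg hnotgt]
      rw [hstep]
      by_cases hx : x = 9
      · subst hx
        have hj0 : j = 0 := by
          rw [PySem.List.index?_cons_self] at hj
          exact (Option.some_inj.mp hj).symm
        subst hj0
        have hco2 : (k : Int) + 1 = ((k + 1 : Nat) : Int) := by push_cast; ring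
        have hidx : (k : Int) + ((0 : Nat) : Int) < ((k + 1 : Nat) : Int) := by
          push_cast; omega
        rw [hco2, (ih.1) lst (k + 1) a ((k : Int) + ((0 : Nat) : Int))
          (hdropsucc lst k hdrop) hidx]
        simp [skip9]
      · obtain ⟨j', hj', rfl⟩ : ∃ j', PySem.List.index? t' 9 = some j' ∧ j = j' + 1 := by
          rw [PySem.List.index?_cons_of_ne t' hx] at hj
          cases h' : PySem.List.index? t' 9 with
          | none => rw [h'] at hj; simp at hj
          | some m =>
            rw [h'] at hj; simp at hj
            exact ⟨m, rfl, by omega⟩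
        have hco : (k : Int) + ((j' + 1 : Nat) : Int) = ((k + 1 : Nat) : Int) + (j' : Int) := by
          push_cast; ring
        have hco2 : (k : Int) + 1 = ((k + 1 : Nat) : Int) := by push_cast; ring
        rw [hco, hco2, (ih.2) lst (k + 1) j' a (hdropsucc lst k hdrop) hj']
        have hs : skip9 (x :: t') = skip9 t' := by simp [skip9, hx]
        rw [hs]

lemma B_both : ∀ t : List Int,
    (∀ a : Int, ((t.zip (suffixHas9 t).1).foldl sum1_69_altStep (a, false)).1 = a + go t) ∧
    (∀ a : Int, (9 : Int) ∈ t →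
      ((t.zip (suffixHas9 t).1).foldl sum1_69_altStep (a, true)).1 = a + go (skip9 t)) := by
  intro t
  induction t with
  | nil => exact ⟨fun a => by simp [go], fun a h => by simp at h⟩
  | cons x t' ih =>
    have hzip : (x :: t').zip (suffixHas9 (x :: t')).1
        = (x, (suffixHas9 t').2 || (x == 9)) :: t'.zip (suffixHas9 t').1 := by
      simp [suffixHas9]
    constructor
    · intro a
      rw [hzip, List.foldl_cons]
      by_cases hx : x = 6
      · subst hx
        by_cases h9 : (9 : Int) ∈ t'
        · have hstep : sum1_69_altStep (a, false) (6, (suffixHas9 t').2 || ((6:Int) == 9))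
              = (a, true) := by
            simp [sum1_69_altStep, seen_eq, h9]
          rw [hstep, (ih.2) a h9]
          rw [go_cons, if_pos rfl, if_pos h9]
        · have hstep : sum1_69_altStep (a, false) (6, (suffixHas9 t').2 || ((6:Int) == 9))
              = (a + 6, false) := by
            simp [sum1_69_altStep, seen_eq, h9]
          rw [hstep, (ih.1) (a + 6)]
          rw [go_cons, if_pos rfl, if_neg h9]; ring
      · have hstep : sum1_69_altStep (a, false) (x, (suffixHas9 t').2 || (x == 9))
            = (a + x, false) := by
          simp [sum1_69_altStep, hx]
        rw [hstep, (ih.1) (a + x)]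
        rw [go_cons, if_neg hx]; ring
    · intro a h9
      rw [hzip, List.foldl_cons]
      by_cases hx : x = 9
      · subst hx
        have hstep : sum1_69_altStep (a, true) (9, (suffixHas9 t').2 || ((9:Int) == 9))
            = (a, false) := by simp [sum1_69_altStep]
        rw [hstep, (ih.1) a]
        simp [skip9]
      · have h9' : (9 : Int) ∈ t' := by
          cases List.mem_cons.mp h9 with
          | inl h => exact absurd h.symm hx
          | inr h => exact h
        have hstep : sum1_69_altStep (a, true) (x, (suffixHas9 t').2 || (x == 9))
            = (a, true) := by simp [sum1_69_altStep, hx]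
        rw [hstep, (ih.2) a h9']
        have hs : skip9 (x :: t') = skip9 t' := by simp [skip9, hx]
        rw [hs]

-- ===== VERDICT (by name: the statement is the Claim_ definition above) =====
theorem sum1_69_spec : Claim_equal_sum1_69 := by
  intro lst _
  unfold Spec_sum1_69 sum1_69 sum1_69_alt
  have hA := (A_both lst).1 lst 0 0 (-1) (by simp) (by norm_num)
  have hB := (B_both lst).1 0
  simp only [Nat.cast_zero] at hA
  rw [hA, hB]
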